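-- pv_equiv track=rewrite | github.com/armin-remotereps/sencha_qa | agents/services/element_finder.py | _build_element_list
-- ===== SOURCE A (Python) =====
-- from collections.abc import Sequence
--
-- def _build_element_list(elements: Sequence[object]) -> str:
--     """Build a numbered list of element descriptions for the AI."""
--     lines: list[str] = []
--     for item in elements:
--         if not isinstance(item, dict):
--             continue
--         idx = item.get("idx", "?")
--         tag = item.get("tag", "unknown")
--         text = item.get("text", "")
--         role = item.get("role", "")
--         aria_label = item.get("ariaLabel", "")
--         placeholder = item.get("placeholder", "")
--         el_type = item.get("type", "")
--         name = item.get("name", "")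
--         el_id = item.get("id", "")
--         href = item.get("href", "")
--
--         parts = [f"[{idx}] <{tag}>"]
--         if text:
--             parts.append(f'text="{text}"')
--         if role:
--             parts.append(f'role="{role}"')
--         if aria_label:
--             parts.append(f'aria-label="{aria_label}"')
--         if placeholder:
--             parts.append(f'placeholder="{placeholder}"')
--         if el_type:
--             parts.append(f'type="{el_type}"')
--         if name:
--             parts.append(f'name="{name}"')
--         if el_id:
--             parts.append(f'id="{el_id}"')
--         if href:
--             parts.append(f'href="{href}"')
--
--         lines.append(" ".join(parts))
--     return "\n".join(lines)
-- ===== SOURCE B (Python) =====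
-- # Different algorithm: instead of probing eight fixed keys with unrolled if-blocks,
-- # scan each element's own items once, collect (priority, fragment) pairs for known
-- # attribute keys via a priority map, and sort them; correct because an element (a dict)
-- # holds each key at most once and the priorities reproduce A's fixed display order.
-- _PRIORITY = {
--     "text": (0, "text"),
--     "role": (1, "role"),
--     "ariaLabel": (2, "aria-label"),
--     "placeholder": (3, "placeholder"),
--     "type": (4, "type"),
--     "name": (5, "name"),
--     "id": (6, "id"),
--     "href": (7, "href"),
-- }
--
-- def _build_element_list(elements) -> str:
--     lines = []
--     for item in elements:
--         if not isinstance(item, dict):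
--             continue
--         attrs = [
--             (_PRIORITY[k][0], f'{_PRIORITY[k][1]}="{v}"')
--             for k, v in item.items()
--             if k in _PRIORITY and v
--         ]
--         attrs.sort(key=lambda t: t[0])
--         head = f'[{item.get("idx", "?")}] <{item.get("tag", "unknown")}>'
--         lines.append(" ".join([head] + [frag for _, frag in attrs]))
--     return "\n".join(lines)
-- ===== Notes on version B (the rewrite author's own statement) =====
-- stated objective: alternative
-- what changed: Instead of probing eight fixed keys with unrolled if-blocks, B scans each element's own items once, collects (priority, fragment) pairs for known attribute keys via a priority map, and sorts them by priority to recover the display order.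
import Mathlib
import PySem

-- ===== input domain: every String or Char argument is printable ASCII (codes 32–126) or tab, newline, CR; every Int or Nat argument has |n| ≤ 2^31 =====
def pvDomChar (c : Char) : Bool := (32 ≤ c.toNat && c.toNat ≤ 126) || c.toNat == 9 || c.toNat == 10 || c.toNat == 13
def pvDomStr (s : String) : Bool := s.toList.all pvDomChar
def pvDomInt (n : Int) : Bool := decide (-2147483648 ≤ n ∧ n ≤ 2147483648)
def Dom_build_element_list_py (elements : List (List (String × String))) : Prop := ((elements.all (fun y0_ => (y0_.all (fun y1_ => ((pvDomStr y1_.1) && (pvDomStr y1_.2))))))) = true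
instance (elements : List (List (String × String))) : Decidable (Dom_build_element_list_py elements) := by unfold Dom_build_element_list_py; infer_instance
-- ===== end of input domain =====

-- B scans each element's own entries once, collecting (priority, fragment) pairs from a
-- priority map, and sorts them — instead of A's eight fixed-key probes; objective: alternative.

-- ===== PORT A =====
-- literal transliteration of _build_element_list: ten dict lookups, eight if-blocks appending fragments
def build_element_list_py (elements : List (List (String × String))) : String :=
  let lines := elements.foldl
    (fun (lines : List String) (item : List (String × String)) =>
      let d := PySem.Dict.mk item
      let idx := d.getD "idx" "?"
      let tag := d.getD "tag" "unknown"
      let text := d.getD "text" ""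
      let role := d.getD "role" ""
      let aria_label := d.getD "ariaLabel" ""
      let placeholder := d.getD "placeholder" ""
      let el_type := d.getD "type" ""
      let name := d.getD "name" ""
      let el_id := d.getD "id" ""
      let href := d.getD "href" ""
      let parts : List String := ["[" ++ idx ++ "] <" ++ tag ++ ">"]
      let parts := if text != "" then parts ++ ["text=\"" ++ text ++ "\""] else parts
      let parts := if role != "" then parts ++ ["role=\"" ++ role ++ "\""] else parts
      let parts := if aria_label != "" then parts ++ ["aria-label=\"" ++ aria_label ++ "\""] else parts
      let parts := if placeholder != "" then parts ++ ["placeholder=\"" ++ placeholder ++ "\""] else parts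
      let parts := if el_type != "" then parts ++ ["type=\"" ++ el_type ++ "\""] else parts
      let parts := if name != "" then parts ++ ["name=\"" ++ name ++ "\""] else parts
      let parts := if el_id != "" then parts ++ ["id=\"" ++ el_id ++ "\""] else parts
      let parts := if href != "" then parts ++ ["href=\"" ++ href ++ "\""] else parts
      lines ++ [PySem.Str.join " " parts])
    []
  PySem.Str.join "\n" lines

-- ===== PORT B =====
-- the constant priority map _PRIORITY of Source B
def pvPriority : PySem.Dict String (Int × String) :=
  PySem.Dict.mk [("text", (0, "text")), ("role", (1, "role")), ("ariaLabel", (2, "aria-label")),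
    ("placeholder", (3, "placeholder")), ("type", (4, "type")), ("name", (5, "name")),
    ("id", (6, "id")), ("href", (7, "href"))]

-- item.items() of the Python dict this assoc list represents: one pair per distinct key
-- (first-occurrence order) with the dict's value for it; on a list with unique keys
-- (every real Python dict) this is the list itself — exact there.
def pyDictItems (item : List (String × String)) : List (String × String) :=
  (PySem.List.dedup (item.map Prod.fst)).map (fun k => (k, (PySem.Dict.mk item).getD k ""))

def build_element_list_py_alt (elements : List (List (String × String))) : String :=
  PySem.Str.join "\n" (elements.foldl
    (fun (lines : List String) (item : List (String × String)) =>
      let d := PySem.Dict.mk item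
      let attrs := (pyDictItems item).filterMap (fun kv =>
        if pvPriority.contains kv.1 && kv.2 != "" then
          some ((pvPriority.getD kv.1 (0, "")).1,
                (pvPriority.getD kv.1 (0, "")).2 ++ "=\"" ++ kv.2 ++ "\"")
        else none)
      let attrs := PySem.List.sorted attrs (fun t => t.1)
      let head := "[" ++ d.getD "idx" "?" ++ "] <" ++ d.getD "tag" "unknown" ++ ">"
      lines ++ [PySem.Str.join " " (head :: attrs.map (fun t => t.2))])
    [])

-- ===== PRECONDITION & SPEC =====
def Spec_build_element_list_py (elements : List (List (String × String))) (out : String) : Prop := out = build_element_list_py_alt elements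
instance (elements : List (List (String × String))) (out : String) : Decidable (Spec_build_element_list_py elements out) := by unfold Spec_build_element_list_py; infer_instance

-- ===== CLAIM (what is proved, stated in full; the proofs are below) =====
def Claim_equal_build_element_list_py : Prop := ∀ (elements : List (List (String × String))), Dom_build_element_list_py elements → Spec_build_element_list_py elements (build_element_list_py elements)

-- ===== LEMMAS AND PROOFS =====

-- the eight displayed fields: (priority, dict key, display label), in A's display order
def pvFields : List (Int × String × String) :=
  [(0, "text", "text"), (1, "role", "role"), (2, "ariaLabel", "aria-label"),
   (3, "placeholder", "placeholder"), (4, "type", "type"), (5, "name", "name"),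
   (6, "id", "id"), (7, "href", "href")]

def pvCond (d : PySem.Dict String String) (f : Int × String × String) : Bool :=
  d.getD f.2.1 "" != ""

def pvFrag (d : PySem.Dict String String) (f : Int × String × String) : Int × String :=
  (f.1, f.2.2 ++ "=\"" ++ d.getD f.2.1 "" ++ "\"")

-- the attribute fragments in A's fixed order
def pvTarget (d : PySem.Dict String String) : List (Int × String) :=
  (pvFields.filter (pvCond d)).map (pvFrag d)

theorem pv_filterMap_if {α β : Type} (p : α → Bool) (f : α → β) (l : List α) :
    l.filterMap (fun x => if p x then some (f x) else none) = (l.filter p).map f := by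
  induction l with
  | nil => rfl
  | cons x xs ih => by_cases h : p x <;> simp [h, ih]

theorem pv_foldl_ext {α β : Type} (f g : β → α → β) (h : ∀ b a, f b a = g b a)
    (l : List α) (init : β) : l.foldl f init = l.foldl g init := by
  induction l generalizing init with
  | nil => rfl
  | cons x xs ih => simp only [List.foldl]; rw [h]; exact ih _

-- B's collected attribute list, as written in the port
def pvAttrs (item : List (String × String)) : List (Int × String) :=
  (pyDictItems item).filterMap (fun kv =>
    if pvPriority.contains kv.1 && kv.2 != "" then
      some ((pvPriority.getD kv.1 (0, "")).1,
            (pvPriority.getD kv.1 (0, "")).2 ++ "=\"" ++ kv.2 ++ "\"")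
    else none)

theorem pv_mem_of_getD_ne (item : List (String × String)) (k : String)
    (h : ((PySem.Dict.mk item).getD k "" != "") = true) : k ∈ item.map Prod.fst := by
  have h2 : (PySem.Dict.mk item).get? k ≠ none := by
    intro hn
    rw [PySem.Dict.getD_eq_get?_getD, hn] at h
    simp at h
  have h3 : k ∈ (PySem.Dict.mk item).keys := by
    by_contra hn
    exact h2 ((PySem.Dict.get?_eq_none_iff_not_mem_keys _ _).mpr hn)
  exact h3

theorem pv_mem_attrs (item : List (String × String)) (x : Int × String) :
    x ∈ pvAttrs item ↔
      ∃ f ∈ pvFields, pvCond (PySem.Dict.mk item) f = true ∧ x = pvFrag (PySem.Dict.mk item) f := by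
  unfold pvAttrs pyDictItems
  rw [List.filterMap_map]
  simp only [List.mem_filterMap, PySem.List.mem_dedup, Function.comp]
  constructor
  · rintro ⟨k, hk, hg⟩
    by_cases hc : (pvPriority.contains k && ((PySem.Dict.mk item).getD k "" != "")) = true
    · rw [if_pos hc] at hg
      rw [Bool.and_eq_true] at hc
      obtain ⟨hck, hv⟩ := hc
      have hkeys : k ∈ ["text", "role", "ariaLabel", "placeholder", "type", "name", "id", "href"] :=
        (PySem.Dict.contains_iff_mem_keys _ _).mp hck
      fin_cases hkeys <;>
        first
        | exact ⟨(0, "text", "text"), by decide, hv, (Option.some.inj hg).symm⟩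
        | exact ⟨(1, "role", "role"), by decide, hv, (Option.some.inj hg).symm⟩
        | exact ⟨(2, "ariaLabel", "aria-label"), by decide, hv, (Option.some.inj hg).symm⟩
        | exact ⟨(3, "placeholder", "placeholder"), by decide, hv, (Option.some.inj hg).symm⟩
        | exact ⟨(4, "type", "type"), by decide, hv, (Option.some.inj hg).symm⟩
        | exact ⟨(5, "name", "name"), by decide, hv, (Option.some.inj hg).symm⟩
        | exact ⟨(6, "id", "id"), by decide, hv, (Option.some.inj hg).symm⟩
        | exact ⟨(7, "href", "href"), by decide, hv, (Option.some.inj hg).symm⟩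
    · rw [if_neg hc] at hg
      exact absurd hg (by simp)
  · rintro ⟨f, hf, hcond, hx⟩
    fin_cases hf <;>
      first
      | exact ⟨"text", pv_mem_of_getD_ne item "text" hcond, by
          rw [if_pos (show (pvPriority.contains "text" && ((PySem.Dict.mk item).getD "text" "" != "")) = true from hcond)]
          exact congrArg some hx.symm⟩
      | exact ⟨"role", pv_mem_of_getD_ne item "role" hcond, by
          rw [if_pos (show (pvPriority.contains "role" && ((PySem.Dict.mk item).getD "role" "" != "")) = true from hcond)]
          exact congrArg some hx.symm⟩
      | exact ⟨"ariaLabel", pv_mem_of_getD_ne item "ariaLabel" hcond, by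
          rw [if_pos (show (pvPriority.contains "ariaLabel" && ((PySem.Dict.mk item).getD "ariaLabel" "" != "")) = true from hcond)]
          exact congrArg some hx.symm⟩
      | exact ⟨"placeholder", pv_mem_of_getD_ne item "placeholder" hcond, by
          rw [if_pos (show (pvPriority.contains "placeholder" && ((PySem.Dict.mk item).getD "placeholder" "" != "")) = true from hcond)]
          exact congrArg some hx.symm⟩
      | exact ⟨"type", pv_mem_of_getD_ne item "type" hcond, by
          rw [if_pos (show (pvPriority.contains "type" && ((PySem.Dict.mk item).getD "type" "" != "")) = true from hcond)]
          exact congrArg some hx.symm⟩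
      | exact ⟨"name", pv_mem_of_getD_ne item "name" hcond, by
          rw [if_pos (show (pvPriority.contains "name" && ((PySem.Dict.mk item).getD "name" "" != "")) = true from hcond)]
          exact congrArg some hx.symm⟩
      | exact ⟨"id", pv_mem_of_getD_ne item "id" hcond, by
          rw [if_pos (show (pvPriority.contains "id" && ((PySem.Dict.mk item).getD "id" "" != "")) = true from hcond)]
          exact congrArg some hx.symm⟩
      | exact ⟨"href", pv_mem_of_getD_ne item "href" hcond, by
          rw [if_pos (show (pvPriority.contains "href" && ((PySem.Dict.mk item).getD "href" "" != "")) = true from hcond)]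
          exact congrArg some hx.symm⟩

theorem pv_nodup_attrs (item : List (String × String)) : (pvAttrs item).Nodup := by
  unfold pvAttrs pyDictItems
  rw [List.filterMap_map]
  rw [show (PySem.List.dedup (item.map Prod.fst)).filterMap
        ((fun kv : String × String =>
          if pvPriority.contains kv.1 && kv.2 != "" then
            some ((pvPriority.getD kv.1 (0, "")).1,
                  (pvPriority.getD kv.1 (0, "")).2 ++ "=\"" ++ kv.2 ++ "\"")
          else none) ∘ (fun k => (k, (PySem.Dict.mk item).getD k "")))
      = ((PySem.List.dedup (item.map Prod.fst)).filter
          (fun k => pvPriority.contains k && ((PySem.Dict.mk item).getD k "" != ""))).map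
          (fun k => ((pvPriority.getD k (0, "")).1,
                     (pvPriority.getD k (0, "")).2 ++ "=\"" ++ (PySem.Dict.mk item).getD k "" ++ "\""))
      from pv_filterMap_if _ _ _]
  refine List.Nodup.map_on ?_ ((PySem.List.nodup_dedup _).filter _)
  intro k hk k' hk' heq
  have hck : pvPriority.contains k = true := by
    have h := (List.mem_filter.mp hk).2
    rw [Bool.and_eq_true] at h
    exact h.1
  have hck' : pvPriority.contains k' = true := by
    have h := (List.mem_filter.mp hk').2
    rw [Bool.and_eq_true] at h
    exact h.1
  have hkeys : k ∈ ["text", "role", "ariaLabel", "placeholder", "type", "name", "id", "href"] :=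
    (PySem.Dict.contains_iff_mem_keys _ _).mp hck
  have hkeys' : k' ∈ ["text", "role", "ariaLabel", "placeholder", "type", "name", "id", "href"] :=
    (PySem.Dict.contains_iff_mem_keys _ _).mp hck'
  fin_cases hkeys <;> fin_cases hkeys' <;>
    first
    | rfl
    | (rw [Prod.mk.injEq] at heq; exact absurd heq.1 (by decide))

theorem pv_pairwise_target (d : PySem.Dict String String) :
    (pvTarget d).Pairwise (fun a b => a.1 < b.1) := by
  have h : pvFields.Pairwise (fun a b => a.1 < b.1) := by decide
  exact List.pairwise_map.mpr ((h.filter (pvCond d)).imp (fun h => h))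

theorem pv_nodup_target (d : PySem.Dict String String) : (pvTarget d).Nodup := by
  refine (pv_pairwise_target d).imp ?_
  intro a b h hab; rw [hab] at h; exact lt_irrefl _ h

theorem pv_mem_target (d : PySem.Dict String String) (x : Int × String) :
    x ∈ pvTarget d ↔ ∃ f ∈ pvFields, pvCond d f = true ∧ x = pvFrag d f := by
  simp only [pvTarget, List.mem_map, List.mem_filter]
  constructor
  · rintro ⟨f, ⟨hf, hc⟩, hx⟩; exact ⟨f, hf, hc, hx.symm⟩
  · rintro ⟨f, hf, hc, hx⟩; exact ⟨f, ⟨hf, hc⟩, hx.symm⟩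

theorem pv_sorted_attrs (item : List (String × String)) :
    PySem.List.sorted (pvAttrs item) (fun t => t.1) = pvTarget (PySem.Dict.mk item) := by
  refine PySem.List.sorted_eq_of_perm_of_pairwise_lt _ _ _ ?_ (pv_pairwise_target _)
  refine (List.perm_ext_iff_of_nodup (pv_nodup_target _) (pv_nodup_attrs item)).mpr ?_
  intro a; rw [pv_mem_target, pv_mem_attrs]

theorem pv_item (item : List (String × String)) :
    (let d := PySem.Dict.mk item
     let parts : List String := ["[" ++ d.getD "idx" "?" ++ "] <" ++ d.getD "tag" "unknown" ++ ">"]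
     let parts := if d.getD "text" "" != "" then parts ++ ["text=\"" ++ d.getD "text" "" ++ "\""] else parts
     let parts := if d.getD "role" "" != "" then parts ++ ["role=\"" ++ d.getD "role" "" ++ "\""] else parts
     let parts := if d.getD "ariaLabel" "" != "" then parts ++ ["aria-label=\"" ++ d.getD "ariaLabel" "" ++ "\""] else parts
     let parts := if d.getD "placeholder" "" != "" then parts ++ ["placeholder=\"" ++ d.getD "placeholder" "" ++ "\""] else parts
     let parts := if d.getD "type" "" != "" then parts ++ ["type=\"" ++ d.getD "type" "" ++ "\""] else parts
     let parts := if d.getD "name" "" != "" then parts ++ ["name=\"" ++ d.getD "name" "" ++ "\""] else parts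
     let parts := if d.getD "id" "" != "" then parts ++ ["id=\"" ++ d.getD "id" "" ++ "\""] else parts
     let parts := if d.getD "href" "" != "" then parts ++ ["href=\"" ++ d.getD "href" "" ++ "\""] else parts
     PySem.Str.join " " parts)
    = PySem.Str.join " "
        (("[" ++ (PySem.Dict.mk item).getD "idx" "?" ++ "] <" ++ (PySem.Dict.mk item).getD "tag" "unknown" ++ ">")
          :: (PySem.List.sorted (pvAttrs item) (fun t => t.1)).map (fun t => t.2)) := by
  rw [pv_sorted_attrs]
  refine congrArg (PySem.Str.join " ") ?_
  have h := PySem.List.foldl_append_if (pvCond (PySem.Dict.mk item))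
    (fun f => (pvFrag (PySem.Dict.mk item) f).2) pvFields
    ["[" ++ (PySem.Dict.mk item).getD "idx" "?" ++ "] <" ++ (PySem.Dict.mk item).getD "tag" "unknown" ++ ">"]
  simp only [pvTarget, List.map_map]
  exact h

-- ===== VERDICT (by name: the statement is the Claim_ definition above) =====
theorem build_element_list_py_spec : Claim_equal_build_element_list_py := by
  intro elements _
  unfold Spec_build_element_list_py build_element_list_py build_element_list_py_alt
  refine congrArg (PySem.Str.join "\n") (pv_foldl_ext _ _ ?_ elements [])
  intro lines item
  exact congrArg (fun x => lines ++ [x]) (pv_item item)
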